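-- pv_equiv track=rewrite | github.com/hikowong/taxomanie | trunk/src/lib/phylogelib.py | getTaxa
-- ===== SOURCE A (Python) =====
-- def getChildren(tree):
--   """ Extract all first child of tree to a list """
--   p = 0
--   chaine = ""
--   newarb = []
--   for i in tree:
--     if i == "(":
--       p += 1
--     if i == ")":
--       p -= 1
--     if (i == "," and p == 1) or (i == ")" and p == 0):
--       newarb.append(chaine)
--       chaine = ""
--       continue
--     if i == "(" and p == 1:
--       continue
--     chaine += i
--   return newarb
--
-- def removeBootStraps(tree):
--   """ Remove all bootstraps from tree """
--   chaine = ""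
--   ignore = False
--   for i in tree:
--     if i == ":":
--       ignore = True
--     if i == "," or i == ")":
--       ignore = False
--     if not ignore:
--       chaine += i
--   return chaine
--
-- def getTaxa(tree):
--   """ Return the taxas list """
--   tree = removeBootStraps(tree)
--   if len(getChildren(tree)) == 0:
--     return [tree]
--   l = []
--   for child in getChildren(tree):
--     l.extend(getTaxa(child))
--   return l
-- ===== SOURCE B (Python) =====
-- def getTaxa(tree):
--     """ Return the taxas list (iterative: strip bootstraps once, then DFS with an explicit stack,
--     splitting each node into children by cut indices and slicing). """
--     buf = []
--     ignore = False
--     for c in tree: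
--         if c == ':':
--             ignore = True
--         elif c == ',' or c == ')':
--             ignore = False
--         if not ignore:
--             buf.append(c)
--     stripped = ''.join(buf)
--     out = []
--     stack = [stripped]
--     while stack:
--         t = stack.pop()
--         cs = _childSplit(t)
--         if cs:
--             stack.extend(reversed(cs))
--         else:
--             out.append(t)
--     return out
--
-- def _childSplit(t):
--     """ Top-level child segments of t: slice between separator indices, dropping depth-1 '(' chars. """
--     p = 0
--     cuts = []
--     skips = set()
--     for i, c in enumerate(t):
--         if c == '(':
--             p += 1
--             if p == 1:
--                 skips.add(i)
--         elif c == ')':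
--             p -= 1
--             if p == 0:
--                 cuts.append(i)
--         elif c == ',' and p == 1:
--             cuts.append(i)
--     parts = []
--     lo = 0
--     for cut in cuts:
--         parts.append(''.join(t[i] for i in range(lo, cut) if i not in skips))
--         lo = cut + 1
--     return parts
-- ===== Notes on version B (the rewrite author's own statement) =====
-- stated objective: alternative
-- what changed: B strips bootstraps once instead of at every recursion level and replaces the recursive descent with an explicit work stack, computing each node's children by recording separator/skip indices in one scan and slicing, instead of A's per-character string accumulation.
import Mathlib
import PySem

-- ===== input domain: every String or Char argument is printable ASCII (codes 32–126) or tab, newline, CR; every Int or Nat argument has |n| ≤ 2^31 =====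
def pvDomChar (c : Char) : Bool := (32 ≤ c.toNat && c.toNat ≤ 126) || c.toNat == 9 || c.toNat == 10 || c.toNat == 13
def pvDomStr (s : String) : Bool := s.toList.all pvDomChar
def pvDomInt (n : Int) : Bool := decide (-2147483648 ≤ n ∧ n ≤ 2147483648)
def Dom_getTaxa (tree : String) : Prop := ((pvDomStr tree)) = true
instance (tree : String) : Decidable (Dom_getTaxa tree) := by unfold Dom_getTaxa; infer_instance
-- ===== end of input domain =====

-- B strips bootstraps once and replaces A's recursion with an explicit work stack whose
-- children are computed by cut indices and slicing (objective: alternative decomposition).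

-- ===== PORT A =====
-- A works on Python str; per the PySem convention strings are handled on the List Char side,
-- with String.toList/String.ofList at the boundary.

-- removeBootStraps: the loop body 'if i==":": ...; if i=="," or i==")": ...; if not ignore: chaine += i'
def pvRbsStep (st : List Char × Bool) (i : Char) : List Char × Bool :=
  let ignore := if i = ':' then true else st.2
  let ignore := if i = ',' ∨ i = ')' then false else ignore
  (if ignore then st.1 else st.1 ++ [i], ignore)

def pvRemoveBootStraps (tree : List Char) : List Char :=
  (tree.foldl pvRbsStep ([], false)).1

-- getChildren: the loop body over state (p, chaine, newarb)
def pvGcStep (st : Int × List Char × List (List Char)) (i : Char) :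
    Int × List Char × List (List Char) :=
  let p := if i = '(' then st.1 + 1 else st.1
  let p := if i = ')' then p - 1 else p
  if (i = ',' ∧ p = 1) ∨ (i = ')' ∧ p = 0) then (p, [], st.2.2 ++ [st.2.1])
  else if i = '(' ∧ p = 1 then (p, st.2.1, st.2.2)
  else (p, st.2.1 ++ [i], st.2.2)

def pvGetChildren (tree : List Char) : List (List Char) :=
  (tree.foldl pvGcStep (0, [], [])).2.2

-- termination facts for getTaxa's recursion (cited by name in decreasing_by)
theorem pvGc_foldl_bound (cs : List Char) : ∀ (p : Int) (buf : List Char) (acc : List (List Char)),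
    ((cs.foldl pvGcStep (p, buf, acc)).2.1.length : Nat)
      + (((cs.foldl pvGcStep (p, buf, acc)).2.2.map (fun c => c.length + 1)).sum)
    ≤ cs.length + buf.length + ((acc.map (fun c => c.length + 1)).sum) := by
  induction cs with
  | nil => simp
  | cons x cs ih =>
    intro p buf acc
    simp only [List.foldl_cons]
    rcases hst : pvGcStep (p, buf, acc) x with ⟨p', buf', acc'⟩
    have hstep : buf'.length + ((acc'.map (fun c => c.length + 1)).sum)
        ≤ 1 + buf.length + ((acc.map (fun c => c.length + 1)).sum) := by
      simp only [pvGcStep] at hst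
      split_ifs at hst <;>
        (injection hst with h1 hst2; injection hst2 with h2 h3; subst h2; subst h3;
         try simp only [List.map_append, List.sum_append, List.map_cons, List.sum_cons,
           List.map_nil, List.sum_nil, List.length_append, List.length_cons,
           List.length_nil]
         omega)
    have := ih p' buf' acc'
    simp only [List.length_cons]
    omega

theorem pvGetChildren_sum_le (t : List Char) :
    (((pvGetChildren t).map (fun c => c.length + 1)).sum) ≤ t.length := by
  have := pvGc_foldl_bound t 0 [] []
  simp only [List.map_nil, List.sum_nil, List.length_nil] at this
  unfold pvGetChildren
  omega

theorem pvGetChildren_length_lt {t c : List Char} (h : c ∈ pvGetChildren t) :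
    c.length < t.length := by
  have hs := pvGetChildren_sum_le t
  have hm : c.length + 1 ≤ ((pvGetChildren t).map (fun c => c.length + 1)).sum :=
    List.single_le_sum (by intro x hx; omega) _ (List.mem_map_of_mem h)
  omega

theorem pvRemoveBootStraps_length_le (t : List Char) :
    (pvRemoveBootStraps t).length ≤ t.length := by
  suffices h : ∀ (cs : List Char) (buf : List Char) (ig : Bool),
      ((cs.foldl pvRbsStep (buf, ig)).1).length ≤ cs.length + buf.length by
    have := h t [] false
    unfold pvRemoveBootStraps
    simpa using this
  intro cs
  induction cs with
  | nil => simp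
  | cons x cs ih =>
    intro buf ig
    simp only [List.foldl_cons]
    rcases hst : pvRbsStep (buf, ig) x with ⟨buf', ig'⟩
    have hlen : buf'.length ≤ buf.length + 1 := by
      simp only [pvRbsStep] at hst
      split_ifs at hst <;>
        (injection hst with h1 h2; subst h1;
         try simp only [List.length_append, List.length_cons, List.length_nil]
         omega)
    have := ih buf' ig'
    simp only [List.length_cons]
    omega

-- getTaxa: 'tree = removeBootStraps(tree); if len(getChildren(tree))==0: return [tree];
--           l=[]; for child in getChildren(tree): l.extend(getTaxa(child)); return l'
def pvGetTaxaC (tree : List Char) : List (List Char) :=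
  if (pvGetChildren (pvRemoveBootStraps tree)).length = 0 then [pvRemoveBootStraps tree]
  else (pvGetChildren (pvRemoveBootStraps tree)).attach.foldl (fun l c => l ++ pvGetTaxaC c.1) []
termination_by tree.length
decreasing_by
  have h1 := pvGetChildren_length_lt c.2
  have h2 := pvRemoveBootStraps_length_le tree
  omega

def getTaxa (tree : String) : List String := (pvGetTaxaC tree.toList).map String.ofList

-- ===== PORT B =====

-- B's fused strip loop: 'if c==":": ignore=True; elif c in ",)": ignore=False; if not ignore: buf.append(c)'
def pvStripStep (st : List Char × Bool) (c : Char) : List Char × Bool :=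
  let ignore := if c = ':' then true else if c = ',' ∨ c = ')' then false else st.2
  (if ignore then st.1 else st.1 ++ [c], ignore)

def pvStrip (tree : List Char) : List Char := (tree.foldl pvStripStep ([], false)).1

-- _childSplit's scan loop over enumerate(t): state (p, cuts, skips)
def pvScanStep (st : Int × List Int × PySem.Set Int) (ic : Int × Char) :
    Int × List Int × PySem.Set Int :=
  if ic.2 = '(' then
    let p := st.1 + 1
    (p, st.2.1, if p = 1 then st.2.2.add ic.1 else st.2.2)
  else if ic.2 = ')' then
    let p := st.1 - 1
    (p, if p = 0 then st.2.1 ++ [ic.1] else st.2.1, st.2.2)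
  else if ic.2 = ',' ∧ st.1 = 1 then (st.1, st.2.1 ++ [ic.1], st.2.2)
  else st

-- ''.join(t[i] for i in range(lo, cut) if i not in skips)
def pvSlicePart (t : List Char) (skips : PySem.Set Int) (lo cut : Int) : List Char :=
  ((PySem.List.pyRange lo cut).filter (fun i => !(skips.contains i))).map
    (fun i => PySem.List.pyGetD t i ' ')

-- the parts loop: 'parts = []; lo = 0; for cut in cuts: parts.append(...); lo = cut+1'
def pvParts (t : List Char) (skips : PySem.Set Int) (cuts : List Int) :
    List (List Char) × Int :=
  cuts.foldl (fun st cut => (st.1 ++ [pvSlicePart t skips st.2 cut], cut + 1)) ([], 0)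

def pvChildSplit (t : List Char) : List (List Char) :=
  let sc := (PySem.List.enumerate t).foldl pvScanStep (0, [], [])
  (pvParts t sc.2.2 sc.2.1).1

-- ---- helper facts for the scan invariant (needed by pvChildSplit_eq, which pvLoopB's
-- ---- termination cites by name) ----

theorem pvPyRange_nil {a b : Int} (h : b ≤ a) : PySem.List.pyRange a b = [] := by
  refine List.eq_nil_iff_forall_not_mem.mpr fun x hx => ?_
  rw [PySem.List.mem_pyRange_one] at hx; omega

theorem pvSlicePart_empty (t : List Char) (s : PySem.Set Int) {lo cut : Int} (h : cut ≤ lo) :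
    pvSlicePart t s lo cut = [] := by
  unfold pvSlicePart
  rw [pvPyRange_nil h]
  rfl

theorem pvContains_add (s : PySem.Set Int) {x i : Int} (h : i ≠ x) :
    (s.add x).contains i = s.contains i := by
  rw [Bool.eq_iff_iff, PySem.Set.contains_iff, PySem.Set.contains_iff, PySem.Set.mem_add]
  constructor
  · rintro (hm | hm)
    · exact hm
    · exact absurd hm h
  · exact fun hm => Or.inl hm

theorem pvSlicePart_append (t : List Char) (c : Char) (s : PySem.Set Int) {lo cut : Int}
    (hlo : 0 ≤ lo) (hcut : cut ≤ (t.length : Int)) :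
    pvSlicePart (t ++ [c]) s lo cut = pvSlicePart t s lo cut := by
  unfold pvSlicePart
  refine List.map_congr_left fun i hi => ?_
  have hi' := List.mem_filter.mp hi
  have hr := PySem.List.mem_pyRange_one.mp hi'.1
  have h0 : 0 ≤ i := le_trans hlo hr.1
  rw [PySem.List.pyGetD_of_nonneg _ _ h0, PySem.List.pyGetD_of_nonneg _ _ h0]
  exact List.getD_append _ _ _ _ (by omega)

theorem pvSlicePart_addskip (t : List Char) (s : PySem.Set Int) {x lo cut : Int}
    (hcut : cut ≤ x) :
    pvSlicePart t (s.add x) lo cut = pvSlicePart t s lo cut := by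
  unfold pvSlicePart
  congr 1
  refine List.filter_congr fun i hi => ?_
  have hr := PySem.List.mem_pyRange_one.mp hi
  rw [pvContains_add s (by omega)]

theorem pvSlicePart_extend (t : List Char) (c : Char) (s : PySem.Set Int) {lo : Int}
    (hn : lo ≤ (t.length : Int)) :
    pvSlicePart (t ++ [c]) s lo ((t.length : Int) + 1)
      = pvSlicePart (t ++ [c]) s lo (t.length : Int)
        ++ (if s.contains (t.length : Int) then [] else [c]) := by
  unfold pvSlicePart
  rw [PySem.List.pyRange_one_append lo (t.length : Int) ((t.length : Int) + 1) hn (by omega)]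
  rw [PySem.List.pyRange_one_cons (a := (t.length : Int)) (b := (t.length : Int) + 1) (by omega)]
  rw [pvPyRange_nil (a := (t.length : Int) + 1) (b := (t.length : Int) + 1) (by omega)]
  rw [List.filter_append, List.map_append]
  congr 1
  rw [List.filter_singleton]
  cases hc : s.contains (t.length : Int) with
  | true => simp
  | false =>
    simp only [Bool.not_false, cond_true, List.map]
    rw [PySem.List.pyGetD_natCast]
    simp

-- the parts fold is unchanged by appending a character past every cut …
theorem pvPartsF_append (t : List Char) (c : Char) (s : PySem.Set Int) :
    ∀ (cuts : List Int) (acc : List (List Char)) (lo : Int), 0 ≤ lo →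
      (∀ j ∈ cuts, 0 ≤ j ∧ j ≤ (t.length : Int)) →
      cuts.foldl (fun st cut => (st.1 ++ [pvSlicePart (t ++ [c]) s st.2 cut], cut + 1)) (acc, lo)
        = cuts.foldl (fun st cut => (st.1 ++ [pvSlicePart t s st.2 cut], cut + 1)) (acc, lo) := by
  intro cuts
  induction cuts with
  | nil => intro acc lo _ _; rfl
  | cons x xs ih =>
    intro acc lo hlo hb
    simp only [List.foldl_cons]
    rw [pvSlicePart_append t c s hlo (hb x (by simp)).2]
    exact ih _ _ (by have := (hb x (by simp)).1; omega)
      (fun j hj => hb j (List.mem_cons_of_mem _ hj))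

-- … and by adding a skip index at or past every cut
theorem pvPartsF_addskip (t : List Char) (s : PySem.Set Int) (x : Int) :
    ∀ (cuts : List Int) (acc : List (List Char)) (lo : Int),
      (∀ j ∈ cuts, j ≤ x) →
      cuts.foldl (fun st cut => (st.1 ++ [pvSlicePart t (s.add x) st.2 cut], cut + 1)) (acc, lo)
        = cuts.foldl (fun st cut => (st.1 ++ [pvSlicePart t s st.2 cut], cut + 1)) (acc, lo) := by
  intro cuts
  induction cuts with
  | nil => intro acc lo _; rfl
  | cons y ys ih =>
    intro acc lo hb
    simp only [List.foldl_cons]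
    rw [pvSlicePart_addskip t s (hb y (by simp))]
    exact ih _ _ (fun j hj => hb j (List.mem_cons_of_mem _ hj))

theorem pvParts_append (init : List Char) (c : Char) (skips : PySem.Set Int) (cuts : List Int)
    (hb : ∀ j ∈ cuts, 0 ≤ j ∧ j ≤ (init.length : Int)) :
    pvParts (init ++ [c]) skips cuts = pvParts init skips cuts := by
  unfold pvParts
  exact pvPartsF_append init c skips cuts [] 0 le_rfl hb

theorem pvParts_addskip (t : List Char) (skips : PySem.Set Int) (x : Int) (cuts : List Int)
    (hb : ∀ j ∈ cuts, j ≤ x) :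
    pvParts t (skips.add x) cuts = pvParts t skips cuts := by
  unfold pvParts
  exact pvPartsF_addskip t skips x cuts [] 0 hb

theorem pvParts_snoc (t : List Char) (skips : PySem.Set Int) (cuts : List Int) (n : Int) :
    pvParts t skips (cuts ++ [n])
      = ((pvParts t skips cuts).1
          ++ [pvSlicePart t skips (pvParts t skips cuts).2 n], n + 1) := by
  unfold pvParts
  rw [List.foldl_append]
  rfl

-- the joint invariant of A's getChildren scan and B's (cuts, skips) scan
def pvAScan (t : List Char) : Int × List Char × List (List Char) :=
  t.foldl pvGcStep (0, [], [])

def pvBScan (t : List Char) : Int × List Int × PySem.Set Int :=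
  (PySem.List.enumerate t).foldl pvScanStep (0, [], [])

def pvInv (t : List Char) : Prop :=
  (pvBScan t).1 = (pvAScan t).1 ∧
  (pvParts t (pvBScan t).2.2 (pvBScan t).2.1).1 = (pvAScan t).2.2 ∧
  (pvAScan t).2.1
    = pvSlicePart t (pvBScan t).2.2 (pvParts t (pvBScan t).2.2 (pvBScan t).2.1).2 (t.length : Int) ∧
  0 ≤ (pvParts t (pvBScan t).2.2 (pvBScan t).2.1).2 ∧
  (pvParts t (pvBScan t).2.2 (pvBScan t).2.1).2 ≤ (t.length : Int) ∧
  (∀ j ∈ (pvBScan t).2.1, 0 ≤ j ∧ j < (t.length : Int)) ∧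
  (∀ j ∈ (pvBScan t).2.2, 0 ≤ j ∧ j < (t.length : Int))

theorem pvInv_holds (t : List Char) : pvInv t := by
  induction t using List.reverseRecOn with
  | nil =>
    refine ⟨rfl, rfl, ?_, by simp [pvParts, pvBScan], by simp [pvParts, pvBScan],
      by simp [pvBScan], by simp [pvBScan]⟩
    simp [pvAScan, pvParts, pvSlicePart, pvBScan]
  | append_singleton init c ih =>
    obtain ⟨h1, h2, h3, h4, h5, h6, h7⟩ := ih
    rcases hA2 : pvAScan init with ⟨pa, buf, acc⟩
    rcases hB2 : pvBScan init with ⟨p, cuts, skips⟩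
    rw [hA2] at h1 h2 h3
    rw [hB2] at h1 h2 h3 h4 h5 h6 h7
    simp only at h1 h2 h3 h4 h5 h6 h7
    subst h1
    have hA : pvAScan (init ++ [c]) = pvGcStep (p, buf, acc) c := by
      unfold pvAScan at hA2 ⊢
      rw [List.foldl_append, hA2]
      rfl
    have hB : pvBScan (init ++ [c]) = pvScanStep (p, cuts, skips) ((init.length : Int), c) := by
      unfold pvBScan at hB2 ⊢
      rw [PySem.List.enumerate_append, List.foldl_append, hB2, PySem.List.enumerate_cons]
      simp [PySem.List.enumerate]
    unfold pvInv
    rw [hA, hB]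
    have hlen : (((init ++ [c]).length : Nat) : Int) = (init.length : Int) + 1 := by
      simp
    have hcn : skips.contains ((init.length : Int)) = false := by
      cases hcc : skips.contains ((init.length : Int)) with
      | false => rfl
      | true =>
        have := (h7 _ (PySem.Set.contains_iff _ _ |>.mp hcc)).2
        omega
    have hcb : ∀ j ∈ cuts, 0 ≤ j ∧ j ≤ (init.length : Int) :=
      fun j hj => ⟨(h6 j hj).1, le_of_lt (h6 j hj).2⟩
    -- the six cases of the two step functions
    by_cases hc1 : c = '('
    · subst hc1
      by_cases hp : p + 1 = 1
      · -- '(' at depth 1: A skips the char, B records a skip index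
        have hg : pvGcStep (p, buf, acc) '(' = (p + 1, buf, acc) := by
          simp [pvGcStep, hp]
        have hs : pvScanStep (p, cuts, skips) ((init.length : Int), '(')
            = (p + 1, cuts, skips.add (init.length : Int)) := by
          simp [pvScanStep, hp]
        rw [hg, hs]
        have hP : pvParts (init ++ ['(']) (skips.add (init.length : Int)) cuts
            = pvParts init skips cuts := by
          rw [pvParts_addskip _ _ _ _ (fun j hj => le_of_lt (h6 j hj).2)]
          exact pvParts_append _ _ _ _ hcb
        refine ⟨rfl, ?_, ?_, ?_, ?_, ?_, ?_⟩
        · rw [hP]; exact h2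
        · rw [hP]
          simp only [hlen]
          rw [pvSlicePart_extend _ _ _ h5]
          have : (skips.add (init.length : Int)).contains ((init.length : Int)) = true :=
            PySem.Set.contains_iff _ _ |>.mpr (PySem.Set.mem_add _ _ _ |>.mpr (Or.inr rfl))
          rw [this]
          rw [pvSlicePart_addskip _ _ le_rfl, pvSlicePart_append _ _ _ h4 le_rfl]
          simpa using h3
        · rw [hP]; exact h4
        · rw [hP]; simp only [hlen]; omega
        · intro j hj
          have := h6 j hj
          simp only [hlen]
          omega
        · intro j hj
          rcases PySem.Set.mem_add _ _ _ |>.mp hj with hm | hm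
          · have := h7 j hm
            simp only [hlen]
            omega
          · subst hm
            simp only [hlen]
            omega
      · -- '(' at deeper level: both sides just append/keep
        have hg : pvGcStep (p, buf, acc) '(' = (p + 1, buf ++ ['('], acc) := by
          simp [pvGcStep, hp]
        have hs : pvScanStep (p, cuts, skips) ((init.length : Int), '(')
            = (p + 1, cuts, skips) := by
          simp [pvScanStep, hp]
        rw [hg, hs]
        have hP : pvParts (init ++ ['(']) skips cuts = pvParts init skips cuts :=
          pvParts_append _ _ _ _ hcb
        refine ⟨rfl, ?_, ?_, ?_, ?_, ?_, ?_⟩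
        · rw [hP]; exact h2
        · rw [hP]
          simp only [hlen]
          rw [pvSlicePart_extend _ _ _ h5, hcn]
          rw [pvSlicePart_append _ _ _ h4 le_rfl, ← h3]; simp
        · rw [hP]; exact h4
        · rw [hP]; simp only [hlen]; omega
        · intro j hj; have := h6 j hj; simp only [hlen]; omega
        · intro j hj; have := h7 j hj; simp only [hlen]; omega
    · by_cases hc2 : c = ')'
      · subst hc2
        by_cases hp : p - 1 = 0
        · -- ')' closing to depth 0: both sides flush
          have hg : pvGcStep (p, buf, acc) ')' = (p - 1, [], acc ++ [buf]) := by
            simp [pvGcStep, hp]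
          have hs : pvScanStep (p, cuts, skips) ((init.length : Int), ')')
              = (p - 1, cuts ++ [(init.length : Int)], skips) := by
            simp [pvScanStep, hp]
          rw [hg, hs]
          have hP : pvParts (init ++ [')']) skips cuts = pvParts init skips cuts :=
            pvParts_append _ _ _ _ hcb
          rw [pvParts_snoc, hP]
          refine ⟨rfl, ?_, ?_, by omega, ?_, ?_, ?_⟩
          · rw [pvSlicePart_append _ _ _ h4 le_rfl, ← h3, h2]
          · exact (pvSlicePart_empty _ _ (by simp only [hlen]; omega)).symm
          · simp only [hlen]; omega
          · intro j hj
            rcases List.mem_append.mp hj with hm | hm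
            · have := h6 j hm; simp only [hlen]; omega
            · simp only [List.mem_singleton] at hm
              subst hm
              simp only [hlen]
              omega
          · intro j hj; have := h7 j hj; simp only [hlen]; omega
        · -- ')' elsewhere: both sides just append/keep
          have hg : pvGcStep (p, buf, acc) ')' = (p - 1, buf ++ [')'], acc) := by
            simp [pvGcStep, hp]
          have hs : pvScanStep (p, cuts, skips) ((init.length : Int), ')')
              = (p - 1, cuts, skips) := by
            simp [pvScanStep, hp]
          rw [hg, hs]
          have hP : pvParts (init ++ [')']) skips cuts = pvParts init skips cuts :=
            pvParts_append _ _ _ _ hcb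
          refine ⟨rfl, ?_, ?_, ?_, ?_, ?_, ?_⟩
          · rw [hP]; exact h2
          · rw [hP]
            simp only [hlen]
            rw [pvSlicePart_extend _ _ _ h5, hcn]
            rw [pvSlicePart_append _ _ _ h4 le_rfl, ← h3]; simp
          · rw [hP]; exact h4
          · rw [hP]; simp only [hlen]; omega
          · intro j hj; have := h6 j hj; simp only [hlen]; omega
          · intro j hj; have := h7 j hj; simp only [hlen]; omega
      · by_cases hc3 : c = ',' ∧ p = 1
        · -- top-level ',': both sides flush
          obtain ⟨hc3c, hc3p⟩ := hc3
          subst hc3c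
          have hg : pvGcStep (p, buf, acc) ',' = (p, [], acc ++ [buf]) := by
            simp [pvGcStep, hc3p]
          have hs : pvScanStep (p, cuts, skips) ((init.length : Int), ',')
              = (p, cuts ++ [(init.length : Int)], skips) := by
            simp [pvScanStep, hc3p]
          rw [hg, hs]
          have hP : pvParts (init ++ [',']) skips cuts = pvParts init skips cuts :=
            pvParts_append _ _ _ _ hcb
          rw [pvParts_snoc, hP]
          refine ⟨rfl, ?_, ?_, by omega, ?_, ?_, ?_⟩
          · rw [pvSlicePart_append _ _ _ h4 le_rfl, ← h3, h2]
          · exact (pvSlicePart_empty _ _ (by simp only [hlen]; omega)).symm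
          · simp only [hlen]; omega
          · intro j hj
            rcases List.mem_append.mp hj with hm | hm
            · have := h6 j hm; simp only [hlen]; omega
            · simp only [List.mem_singleton] at hm
              subst hm
              simp only [hlen]
              omega
          · intro j hj; have := h7 j hj; simp only [hlen]; omega
        · -- any other character: both sides just append/keep
          have hg : pvGcStep (p, buf, acc) c = (p, buf ++ [c], acc) := by
            simp [pvGcStep, hc1, hc2]
            intro hcc
            exact fun hpp => hc3 ⟨hcc, hpp⟩
          have hs : pvScanStep (p, cuts, skips) ((init.length : Int), c)
              = (p, cuts, skips) := by
            simp [pvScanStep, hc1, hc2]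
            intro hcc hpp
            exact absurd ⟨hcc, hpp⟩ hc3
          rw [hg, hs]
          have hP : pvParts (init ++ [c]) skips cuts = pvParts init skips cuts :=
            pvParts_append _ _ _ _ hcb
          refine ⟨rfl, ?_, ?_, ?_, ?_, ?_, ?_⟩
          · rw [hP]; exact h2
          · rw [hP]
            simp only [hlen]
            rw [pvSlicePart_extend _ _ _ h5, hcn]
            rw [pvSlicePart_append _ _ _ h4 le_rfl, ← h3]; simp
          · rw [hP]; exact h4
          · rw [hP]; simp only [hlen]; omega
          · intro j hj; have := h6 j hj; simp only [hlen]; omega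
          · intro j hj; have := h7 j hj; simp only [hlen]; omega

-- the central equality, also needed for pvLoopB's termination (cited by name below)
theorem pvChildSplit_eq (t : List Char) : pvChildSplit t = pvGetChildren t := by
  simpa [pvChildSplit, pvGetChildren, pvBScan, pvAScan] using (pvInv_holds t).2.1

-- B's work-stack loop; the Lean stack list keeps the top FIRST (Python's stack.pop() takes the
-- list's end and stack.extend(reversed(cs)) puts cs[0] on top, i.e. the head here).
def pvLoopB (stack : List (List Char)) (out : List (List Char)) : List (List Char) :=
  match stack with
  | [] => out
  | t :: rest =>
    let cs := pvChildSplit t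
    if cs = [] then pvLoopB rest (out ++ [t])
    else pvLoopB (cs ++ rest) out
termination_by (stack.map (fun c => c.length + 1)).sum
decreasing_by
  · simp
  · have h1 := pvGetChildren_sum_le t
    rw [← pvChildSplit_eq] at h1
    simp only [List.map_append, List.sum_append, List.map_cons, List.sum_cons]
    omega

def getTaxa_alt (tree : String) : List String :=
  (pvLoopB [pvStrip tree.toList] []).map String.ofList

-- ===== PRECONDITION & SPEC =====
def Spec_getTaxa (tree : String) (out : List String) : Prop := out = getTaxa_alt tree
instance (tree : String) (out : List String) : Decidable (Spec_getTaxa tree out) := by unfold Spec_getTaxa; infer_instance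

-- ===== CLAIM (what is proved, stated in full; the proofs are below) =====
def Claim_equal_getTaxa : Prop := ∀ (tree : String), Dom_getTaxa tree → Spec_getTaxa tree (getTaxa tree)

-- ===== LEMMAS AND PROOFS =====

-- B's fused strip step is A's removeBootStraps step
theorem pvStripStep_eq : pvStripStep = pvRbsStep := by
  funext st c
  unfold pvStripStep pvRbsStep
  by_cases h1 : c = ':'
  · subst h1; simp
  · simp [h1]

theorem pvStrip_eq (t : List Char) : pvStrip t = pvRemoveBootStraps t := by
  unfold pvStrip pvRemoveBootStraps
  rw [pvStripStep_eq]

-- removeBootStraps never emits a colon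
theorem pvRbs_foldl_no_colon (cs : List Char) : ∀ (buf : List Char) (ig : Bool),
    ':' ∉ buf → ':' ∉ (cs.foldl pvRbsStep (buf, ig)).1 := by
  induction cs with
  | nil => intro buf ig hb; simpa using hb
  | cons x cs ih =>
    intro buf ig hb
    simp only [List.foldl_cons]
    rcases hst : pvRbsStep (buf, ig) x with ⟨buf', ig'⟩
    have hb' : ':' ∉ buf' := by
      simp only [pvRbsStep] at hst
      injection hst with hst1 _
      by_cases hx : x = ':'
      · subst hx
        simp at hst1
        rw [← hst1]
        exact hb
      · split_ifs at hst1 <;> rw [← hst1] <;>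
          first
            | exact hb
            | simp [hb, Ne.symm hx]
    exact ih buf' ig' hb'

theorem pvRbs_no_colon (t : List Char) : ':' ∉ pvRemoveBootStraps t :=
  pvRbs_foldl_no_colon t [] false (by simp)

-- on colon-free input removeBootStraps is the identity
theorem pvRbs_foldl_id (cs : List Char) : ∀ (buf : List Char), ':' ∉ cs →
    cs.foldl pvRbsStep (buf, false) = (buf ++ cs, false) := by
  induction cs with
  | nil => intro buf _; simp
  | cons x cs ih =>
    intro buf h
    have hx : ¬x = ':' := fun hh => h (hh ▸ List.mem_cons_self)
    have hstep : pvRbsStep (buf, false) x = (buf ++ [x], false) := by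
      simp only [pvRbsStep, if_neg hx]
      split_ifs <;> first | rfl | contradiction
    rw [List.foldl_cons, hstep, ih (buf ++ [x]) (fun hm => h (List.mem_cons_of_mem _ hm))]
    simp

theorem pvRbs_id {t : List Char} (h : ':' ∉ t) : pvRemoveBootStraps t = t := by
  unfold pvRemoveBootStraps
  rw [pvRbs_foldl_id t [] h]
  simp

theorem pvRbs_idem (t : List Char) :
    pvRemoveBootStraps (pvRemoveBootStraps t) = pvRemoveBootStraps t :=
  pvRbs_id (pvRbs_no_colon t)

-- getChildren of a colon-free string yields colon-free children
theorem pvGc_foldl_no_colon (cs : List Char) : ∀ (p : Int) (buf : List Char)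
    (acc : List (List Char)), ':' ∉ cs → ':' ∉ buf → (∀ c ∈ acc, ':' ∉ c) →
    ':' ∉ (cs.foldl pvGcStep (p, buf, acc)).2.1
      ∧ ∀ c ∈ (cs.foldl pvGcStep (p, buf, acc)).2.2, ':' ∉ c := by
  induction cs with
  | nil => intro p buf acc _ hb ha; exact ⟨hb, ha⟩
  | cons x cs ih =>
    intro p buf acc h hb ha
    have hx : ¬x = ':' := fun hh => h (hh ▸ List.mem_cons_self)
    simp only [List.foldl_cons]
    rcases hst : pvGcStep (p, buf, acc) x with ⟨p', buf', acc'⟩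
    have hkeep : (':' ∉ buf') ∧ (∀ c ∈ acc', ':' ∉ c) := by
      simp only [pvGcStep] at hst
      split_ifs at hst <;>
          (injection hst with h1 hst2; injection hst2 with h2 h3; rw [← h2, ← h3]) <;>
        first
          | exact ⟨hb, ha⟩
          | (refine ⟨by simp, fun c hc => ?_⟩
             rcases List.mem_append.mp hc with hm | hm
             · exact ha c hm
             · simp only [List.mem_singleton] at hm
               exact hm ▸ hb)
          | (refine ⟨?_, ha⟩
             simp [hb, Ne.symm hx])
    exact ih p' buf' acc' (fun hm => h (List.mem_cons_of_mem _ hm)) hkeep.1 hkeep.2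

theorem pvGetChildren_no_colon {t : List Char} (h : ':' ∉ t) :
    ∀ c ∈ pvGetChildren t, ':' ∉ c := by
  unfold pvGetChildren
  exact (pvGc_foldl_no_colon t 0 [] [] h (by simp) (by simp)).2

-- A's recursion written with flatMap
theorem pvGetTaxaC_eq (tree : List Char) :
    pvGetTaxaC tree
      = if (pvGetChildren (pvRemoveBootStraps tree)).length = 0
          then [pvRemoveBootStraps tree]
          else (pvGetChildren (pvRemoveBootStraps tree)).flatMap pvGetTaxaC := by
  rw [pvGetTaxaC]
  congr 1
  rw [List.foldl_attach (f := fun l c => l ++ pvGetTaxaC c), PySem.List.foldl_append_eq_flatMap]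
  simp

-- one unfolding of B's stack loop
theorem pvLoopB_cons (t : List Char) (rest out : List (List Char)) :
    pvLoopB (t :: rest) out
      = if pvChildSplit t = [] then pvLoopB rest (out ++ [t])
        else pvLoopB (pvChildSplit t ++ rest) out := by
  rw [pvLoopB]

-- processing one colon-free stack entry appends exactly its taxa list
theorem pvLoopB_spec : ∀ (n : Nat) (t : List Char), t.length ≤ n → ':' ∉ t →
    ∀ (rest out : List (List Char)),
      pvLoopB (t :: rest) out = pvLoopB rest (out ++ pvGetTaxaC t) := by
  intro n
  induction n with
  | zero =>
    intro t hl _ rest out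
    have ht : t = [] := List.length_eq_zero_iff.mp (Nat.le_zero.mp hl)
    subst ht
    rw [pvLoopB_cons, pvChildSplit_eq, pvGetTaxaC_eq]
    rfl
  | succ n ih =>
    intro t hl ht rest out
    rw [pvLoopB_cons, pvChildSplit_eq, pvGetTaxaC_eq, pvRbs_id ht]
    by_cases hch : pvGetChildren t = []
    · rw [if_pos hch, if_pos (by rw [hch]; rfl)]
    · have aux : ∀ (cs : List (List Char)), (∀ c ∈ cs, c.length ≤ n ∧ ':' ∉ c) →
          ∀ (rest out : List (List Char)),
            pvLoopB (cs ++ rest) out = pvLoopB rest (out ++ cs.flatMap pvGetTaxaC) := by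
        intro cs
        induction cs with
        | nil => intro _ rest out; simp
        | cons c cs ihc =>
          intro hc rest out
          rw [List.cons_append,
            ih c (hc c List.mem_cons_self).1 (hc c List.mem_cons_self).2 (cs ++ rest) out,
            ihc (fun d hd => hc d (List.mem_cons_of_mem _ hd)) rest]
          simp [List.append_assoc]
      rw [if_neg hch, if_neg (by simpa using hch)]
      refine aux (pvGetChildren t) (fun c hc => ⟨?_, pvGetChildren_no_colon ht c hc⟩) rest out
      have := pvGetChildren_length_lt hc
      omega

-- ===== VERDICT (by name: the statement is the Claim_ definition above) =====
theorem getTaxa_spec : Claim_equal_getTaxa := by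
  intro tree _
  unfold Spec_getTaxa getTaxa getTaxa_alt
  rw [pvStrip_eq]
  rw [pvLoopB_spec (pvRemoveBootStraps tree.toList).length _ le_rfl
    (pvRbs_no_colon tree.toList) [] []]
  have hloop : ∀ (out : List (List Char)), pvLoopB [] out = out := fun out => by rw [pvLoopB]
  rw [hloop]
  congr 1
  rw [pvGetTaxaC_eq tree.toList, pvGetTaxaC_eq (pvRemoveBootStraps tree.toList), pvRbs_idem]
  simp
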